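-- pv_equiv track=rewrite | github.com/JordinaGR/sorting-algs-visualization | algs/binary_search.py | color_func
-- ===== SOURCE A (Python) =====
-- def color_func(datalen, head, tail, mid):
--     colorarray = []
--     for i in range(datalen):
--         if i >= head and i <= tail:
--             colorarray.append("grey")
--         else:
--             colorarray.append('black')
--
--         if i == mid:
--             colorarray[i] = 'red'
--
--     return colorarray
-- ===== SOURCE B (Python) =====
-- def color_func(datalen, head, tail, mid):
--     n = max(0, datalen)
--     arr = ['black'] * n
--     lo = max(0, head)
--     hi = min(n - 1, tail)
--     if lo <= hi:
--         arr[lo:hi + 1] = ['grey'] * (hi - lo + 1)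
--     if 0 <= mid < n:
--         arr[mid] = 'red'
--     return arr
-- ===== Notes on version B (the rewrite author's own statement) =====
-- stated objective: simpler
-- what changed: Replaces the element-wise loop with per-index branching by bulk painting: a black base list, one clamped slice assignment for the grey band, and one in-range red write at mid.
import Mathlib
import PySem

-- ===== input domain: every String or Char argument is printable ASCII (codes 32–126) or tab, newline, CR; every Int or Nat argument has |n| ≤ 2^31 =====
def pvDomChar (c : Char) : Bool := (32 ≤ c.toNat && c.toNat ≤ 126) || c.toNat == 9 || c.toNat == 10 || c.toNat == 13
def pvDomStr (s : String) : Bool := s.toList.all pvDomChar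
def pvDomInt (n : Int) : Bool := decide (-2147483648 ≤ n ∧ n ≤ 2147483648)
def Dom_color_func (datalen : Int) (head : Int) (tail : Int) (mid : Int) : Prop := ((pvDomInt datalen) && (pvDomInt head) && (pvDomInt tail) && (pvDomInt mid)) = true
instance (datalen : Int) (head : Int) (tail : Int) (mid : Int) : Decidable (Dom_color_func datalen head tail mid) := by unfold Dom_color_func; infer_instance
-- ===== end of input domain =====

-- B builds the result by bulk segment painting (black base, clamped grey slice, one red write)
-- instead of A's element-wise loop; objective: simpler. Both are total; return values proved equal.

-- ===== PORT A =====
def color_func (datalen : Int) (head : Int) (tail : Int) (mid : Int) : List String :=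
  (PySem.List.pyRange 0 datalen 1).foldl (fun colorarray i =>
    let colorarray := colorarray ++ [if i ≥ head ∧ i ≤ tail then "grey" else "black"]
    if i = mid then colorarray.set i.toNat "red" else colorarray) []

-- ===== PORT B =====
def color_func_alt (datalen : Int) (head : Int) (tail : Int) (mid : Int) : List String :=
  let n := max 0 datalen
  let arr := List.replicate n.toNat "black"
  let lo := max 0 head
  let hi := min (n - 1) tail
  let arr := if lo ≤ hi then
      arr.take lo.toNat ++ List.replicate (hi - lo + 1).toNat "grey" ++ arr.drop (hi + 1).toNat
    else arr
  if 0 ≤ mid ∧ mid < n then arr.set mid.toNat "red" else arr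

-- ===== PRECONDITION & SPEC =====
def Spec_color_func (datalen : Int) (head : Int) (tail : Int) (mid : Int) (out : List String) : Prop := out = color_func_alt datalen head tail mid
instance (datalen : Int) (head : Int) (tail : Int) (mid : Int) (out : List String) : Decidable (Spec_color_func datalen head tail mid out) := by unfold Spec_color_func; infer_instance

-- ===== CLAIM (what is proved, stated in full; the proofs are below) =====
def Claim_equal_color_func : Prop := ∀ (datalen : Int) (head : Int) (tail : Int) (mid : Int), Dom_color_func datalen head tail mid → Spec_color_func datalen head tail mid (color_func datalen head tail mid)

-- ===== LEMMAS AND PROOFS =====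

/-- the color of index `j`: the common characterization of both programs -/
def gcolor (head tail mid : Int) (j : Nat) : String :=
  if (j : Int) = mid then "red"
  else if head ≤ (j : Int) ∧ (j : Int) ≤ tail then "grey" else "black"

lemma set_append_last {α : Type} (l : List α) (a b : α) :
    (l ++ [a]).set l.length b = l ++ [b] := by
  induction l with
  | nil => rfl
  | cons x xs ih => simp [ih]

lemma color_func_eq_map (datalen head tail mid : Int) :
    color_func datalen head tail mid =
      (List.range datalen.toNat).map (gcolor head tail mid) := by
  unfold color_func
  rw [PySem.List.pyRange_one]
  simp only [Int.sub_zero, zero_add]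
  induction datalen.toNat with
  | zero => rfl
  | succ n ih =>
    rw [List.range_succ, List.map_append, List.foldl_append, ih]
    simp only [List.map_cons, List.map_nil, List.foldl_cons, List.foldl_nil, List.map_append]
    by_cases hm : (n : Int) = mid
    · have key : (((List.range n).map (gcolor head tail mid)) ++
          [if head ≤ (n : Int) ∧ (n : Int) ≤ tail then "grey" else "black"]).set n "red"
          = ((List.range n).map (gcolor head tail mid)) ++ ["red"] := by
        have h2 := set_append_last ((List.range n).map (gcolor head tail mid))
          (if head ≤ (n : Int) ∧ (n : Int) ≤ tail then "grey" else "black") "red"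
        simpa using h2
      simp only [hm, if_pos, gcolor]
      rw [← hm]
      simpa using key
    · simp [hm, gcolor]

lemma base_eq_map (datalen head tail : Int) :
    (if max 0 head ≤ min (max 0 datalen - 1) tail then
       (List.replicate (max 0 datalen).toNat "black").take (max 0 head).toNat ++
         List.replicate (min (max 0 datalen - 1) tail - max 0 head + 1).toNat "grey" ++
         (List.replicate (max 0 datalen).toNat "black").drop (min (max 0 datalen - 1) tail + 1).toNat
     else List.replicate (max 0 datalen).toNat "black") =
    (List.range datalen.toNat).map (fun (j : Nat) =>
      if head ≤ (j : Int) ∧ (j : Int) ≤ tail then "grey" else "black") := by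
  set N := datalen.toNat with hN
  have hmax : (max 0 datalen).toNat = N := by omega
  split_ifs with hband
  · apply List.ext_getElem
    · simp [hmax]; omega
    · intro j hj hj'
      have hjN : j < N := by simpa [hmax] using hj'
      rw [List.getElem_map, List.getElem_range]
      simp only [List.take_replicate, List.drop_replicate, List.getElem_append,
        List.getElem_replicate, List.length_replicate, List.length_append]
      split_ifs <;> first | rfl | (exfalso; omega)
  · apply List.ext_getElem
    · simp [hmax]
    · intro j hj hj'
      have hjN : j < N := by simpa [hmax] using hj'
      rw [List.getElem_map, List.getElem_range, List.getElem_replicate]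
      have : ¬ (head ≤ (j : Int) ∧ (j : Int) ≤ tail) := by omega
      simp [this]

lemma color_func_alt_eq_map (datalen head tail mid : Int) :
    color_func_alt datalen head tail mid =
      (List.range datalen.toNat).map (gcolor head tail mid) := by
  simp only [color_func_alt]
  rw [base_eq_map datalen head tail]
  set N := datalen.toNat with hN
  split_ifs with hm
  · apply List.ext_getElem
    · simp
    · intro j hj hj'
      have hjN : j < N := by simpa using hj'
      rw [List.getElem_set]
      by_cases hjm : mid.toNat = j
      · rw [if_pos hjm]
        have h1 : (j : Int) = mid := by omega
        simp [gcolor, h1]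
      · rw [if_neg hjm]
        have h1 : ¬ (j : Int) = mid := by omega
        rw [List.getElem_map, List.getElem_range]
        simp [gcolor, h1]
  · apply List.ext_getElem
    · simp
    · intro j hj hj'
      have hjN : j < N := by simpa using hj'
      have : ¬ (j : Int) = mid := by omega
      simp [gcolor, this]

-- ===== VERDICT (by name: the statement is the Claim_ definition above) =====
theorem color_func_spec : Claim_equal_color_func := by
  intro d h t m _
  unfold Spec_color_func
  rw [color_func_eq_map, color_func_alt_eq_map]
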